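-- pv_equiv track=rewrite | github.com/rileydrellishak/adagrams-py | adagrams/game.py | tied_words_stats
-- ===== SOURCE A (Python) =====
-- def tied_words_stats(tied_words):
--     """Gets shortest word, longest word, and first ten letter word from a list of words with tied scores.
--
--     Args:
--         tied_words (list): A list of words with equal scores.
--
--     Returns
--         dict: stats. Returns dictionary with descriptors as keys and words as values. If there is a ten letter word in the tied_words list, the shortest and longest words will not be accurate since the first ten letter word is the tie breaker. If there is no ten letter word, the shortest and longest words are accurate.
--     """
--     stats = {
--         "shortest_word": tied_words[0],
--         "longest_word": tied_words[0],
--         "first_ten_letter_word": None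
--     }
--     if len(tied_words[0]) == 10:
--         stats["first_ten_letter_word"] = tied_words[0]
--         return stats
--
--     for i in range(1, len(tied_words)):
--         if len(tied_words[i]) == 10 and stats["first_ten_letter_word"] == None:
--             stats["first_ten_letter_word"] = tied_words[i]
--             return stats
--
--         elif len(tied_words[i]) > len(stats["longest_word"]):
--             stats["longest_word"] = tied_words[i]
--
--         elif len(tied_words[i]) < len(stats["shortest_word"]):
--             stats["shortest_word"] = tied_words[i]
--
--     return stats
-- ===== SOURCE B (Python) =====
-- def tied_words_stats(tied_words):
--     first = tied_words[0]
--     ten_idx = next((i for i, w in enumerate(tied_words) if len(w) == 10), None)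
--     prefix = tied_words[:ten_idx] or [first]
--     return {
--         "shortest_word": min(prefix, key=len),
--         "longest_word": max(prefix, key=len),
--         "first_ten_letter_word": None if ten_idx is None else tied_words[ten_idx],
--     }
-- ===== Notes on version B (the rewrite author's own statement) =====
-- stated objective: simpler
-- what changed: Instead of one running pass with early return and an elif chain of accumulator updates, B first locates the index of the first ten-letter word, slices the prefix before it (falling back to [first] when that slice is empty), and aggregates with min/max keyed by length.
import Mathlib
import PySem

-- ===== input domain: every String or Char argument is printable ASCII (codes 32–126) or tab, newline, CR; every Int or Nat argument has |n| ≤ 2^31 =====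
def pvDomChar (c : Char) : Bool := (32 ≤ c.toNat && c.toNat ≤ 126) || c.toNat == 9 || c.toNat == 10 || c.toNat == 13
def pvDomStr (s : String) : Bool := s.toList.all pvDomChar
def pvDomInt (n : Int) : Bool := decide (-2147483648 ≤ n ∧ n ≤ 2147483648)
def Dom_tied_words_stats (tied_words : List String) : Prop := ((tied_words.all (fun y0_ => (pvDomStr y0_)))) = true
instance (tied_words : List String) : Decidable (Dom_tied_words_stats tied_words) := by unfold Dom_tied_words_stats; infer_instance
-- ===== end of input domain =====

-- B locates the first ten-letter word's index up front, then aggregates min/max by length over the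
-- prefix before it (objective: simpler decomposition, same cost); A = B on every non-empty list.


-- ===== PORT A =====
-- A's loop `for i in range(1, len(tied_words))` reads tied_words[i] for i = 1 .. n-1, i.e. it walks
-- the tail of the list in order; it is ported exactly as structural recursion on that tail, carrying
-- the two accumulators stats["shortest_word"] and stats["longest_word"].  Inside the loop
-- stats["first_ten_letter_word"] is still None (the function returns as soon as it is set), so
-- A's condition `len(tied_words[i]) == 10 and stats["first_ten_letter_word"] == None` is the
-- first test below; the early `return stats` is the recursion stopping with `some w`.
def tiedA_go : List String → String → String → String × String × Option String
  | [], sh, lo => (sh, lo, none)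
  | w :: rest, sh, lo =>
    if PySem.Str.len w = 10 then (sh, lo, some w)
    else if PySem.Str.len lo < PySem.Str.len w then tiedA_go rest sh w
    else if PySem.Str.len w < PySem.Str.len sh then tiedA_go rest w lo
    else tiedA_go rest sh lo

-- the stats dict has three fixed distinct keys inserted in this order, so its
-- items list is written literally
def tied_words_stats (tied_words : List String) : List (String × Option String) :=
  match tied_words with
  | [] => []   -- Python raises IndexError on tied_words[0]; excluded by Pre_
  | w0 :: rest =>
    if PySem.Str.len w0 = 10 then
      [("shortest_word", some w0), ("longest_word", some w0), ("first_ten_letter_word", some w0)]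
    else
      let r := tiedA_go rest w0 w0
      [("shortest_word", some r.1), ("longest_word", some r.2.1), ("first_ten_letter_word", r.2.2)]

-- ===== PORT B =====
def tied_words_stats_alt (tied_words : List String) : List (String × Option String) :=
  let first := tied_words.headD ""   -- tied_words[0]; Pre_ excludes the empty list
  let tenIdx : Option Nat := tied_words.findIdx? (fun w => PySem.Str.len w == 10)
  let pfx0 : List String := match tenIdx with
    | none => tied_words          -- tied_words[:None]
    | some i => tied_words.take i -- tied_words[:ten_idx]
  let pfx := if pfx0.isEmpty then [first] else pfx0   -- `... or [first]`
  [("shortest_word", PySem.List.min? pfx PySem.Str.len),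
   ("longest_word", PySem.List.max? pfx PySem.Str.len),
   ("first_ten_letter_word", tenIdx.bind (fun i => tied_words[i]?))]

-- ===== PRECONDITION & SPEC =====
-- Pre_ excludes only the empty list, on which A raises IndexError at tied_words[0].
def Pre_tied_words_stats (tied_words : List String) : Prop := tied_words ≠ []
instance (tied_words : List String) : Decidable (Pre_tied_words_stats tied_words) := by
  unfold Pre_tied_words_stats; infer_instance
def pvWitness_tied_words_stats : List String := ["cat", "elephantss", "hippo"]

def Spec_tied_words_stats (tied_words : List String) (out : List (String × Option String)) : Prop := out = tied_words_stats_alt tied_words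
instance (tied_words : List String) (out : List (String × Option String)) : Decidable (Spec_tied_words_stats tied_words out) := by unfold Spec_tied_words_stats; infer_instance

-- ===== CLAIM (what is proved, stated in full; the proofs are below) =====
def Claim_equal_tied_words_stats : Prop := ∀ (tied_words : List String), Dom_tied_words_stats tied_words → Pre_tied_words_stats tied_words → Spec_tied_words_stats tied_words (tied_words_stats tied_words)

-- ===== LEMMAS AND PROOFS =====

-- running minimum / maximum by length (first extremum kept), seeded with an element
def minL (m : String) (l : List String) : String :=
  l.foldl (fun m x => if PySem.Str.len x < PySem.Str.len m then x else m) m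
def maxL (m : String) (l : List String) : String :=
  l.foldl (fun m x => if PySem.Str.len m < PySem.Str.len x then x else m) m

lemma min?_cons : ∀ (t : List String) (x : String),
    PySem.List.min? (x :: t) PySem.Str.len = some (minL x t) := by
  intro t
  induction t with
  | nil => intro x; simp [PySem.List.min?, minL]
  | cons y t ih =>
    intro x
    have h1 : PySem.List.min? (x :: y :: t) PySem.Str.len
        = PySem.List.min? ((if PySem.Str.len y < PySem.Str.len x then y else x) :: t) PySem.Str.len := by
      simp only [PySem.List.min?, List.foldl_cons]
      split_ifs <;> simp_all [PySem.Str.len]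
    rw [h1, ih]
    simp only [minL, List.foldl_cons]

lemma max?_cons : ∀ (t : List String) (x : String),
    PySem.List.max? (x :: t) PySem.Str.len = some (maxL x t) := by
  intro t
  induction t with
  | nil => intro x; simp [PySem.List.max?, maxL]
  | cons y t ih =>
    intro x
    have h1 : PySem.List.max? (x :: y :: t) PySem.Str.len
        = PySem.List.max? ((if PySem.Str.len x < PySem.Str.len y then y else x) :: t) PySem.Str.len := by
      simp only [PySem.List.max?, List.foldl_cons]
      split_ifs <;> simp_all [PySem.Str.len]
    rw [h1, ih]
    simp only [maxL, List.foldl_cons]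

-- under the invariant len sh ≤ len lo, A's elif chain is the simultaneous min/max update
lemma go_step (t : List String) (w sh lo : String)
    (h10 : ¬ PySem.Str.len w = 10) (hle : PySem.Str.len sh ≤ PySem.Str.len lo) :
    tiedA_go (w :: t) sh lo
      = tiedA_go t (if PySem.Str.len w < PySem.Str.len sh then w else sh)
                   (if PySem.Str.len lo < PySem.Str.len w then w else lo) := by
  simp only [tiedA_go, if_neg h10]
  by_cases hlong : PySem.Str.len lo < PySem.Str.len w
  · have hsh : ¬ PySem.Str.len w < PySem.Str.len sh := by
      simp only [PySem.Str.len_eq] at *; omega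
    rw [if_pos hlong, if_neg hsh, if_pos hlong]
  · rw [if_neg hlong, if_neg hlong]
    by_cases hshort : PySem.Str.len w < PySem.Str.len sh
    · rw [if_pos hshort, if_pos hshort]
    · rw [if_neg hshort, if_neg hshort]

lemma inv_step (w sh lo : String) (hle : PySem.Str.len sh ≤ PySem.Str.len lo) :
    PySem.Str.len (if PySem.Str.len w < PySem.Str.len sh then w else sh)
      ≤ PySem.Str.len (if PySem.Str.len lo < PySem.Str.len w then w else lo) := by
  split_ifs <;> simp only [PySem.Str.len_eq] at * <;> omega

-- characterisation of A's loop by the index of the first ten-letter word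
lemma go_eq : ∀ (rest : List String) (sh lo : String),
    PySem.Str.len sh ≤ PySem.Str.len lo →
    tiedA_go rest sh lo =
      match rest.findIdx? (fun w => PySem.Str.len w == 10) with
      | none => (minL sh rest, maxL lo rest, none)
      | some i => (minL sh (rest.take i), maxL lo (rest.take i), rest[i]?) := by
  intro rest
  induction rest with
  | nil => intro sh lo _; simp [tiedA_go, minL, maxL]
  | cons w t ih =>
    intro sh lo hle
    by_cases h10 : PySem.Str.len w = 10
    · have h10' : (↑w.length : Int) = 10 := by simpa [PySem.Str.len_eq] using h10
      rw [show tiedA_go (w :: t) sh lo = (sh, lo, some w) by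
        simp only [tiedA_go, if_pos h10]]
      simp [List.findIdx?_cons, h10', minL, maxL]
    · have h10' : ¬ (↑w.length : Int) = 10 := by simpa [PySem.Str.len_eq] using h10
      rw [go_step t w sh lo h10 hle, ih _ _ (inv_step w sh lo hle)]
      have hfi : (w :: t).findIdx? (fun w => PySem.Str.len w == 10)
          = (t.findIdx? (fun w => PySem.Str.len w == 10)).map (· + 1) := by
        simp [List.findIdx?_cons, h10']
      rw [hfi]
      cases t.findIdx? (fun w => PySem.Str.len w == 10) with
      | none => simp [minL, maxL]
      | some i => simp [minL, maxL]

-- ===== VERDICT (by name: the statement is the Claim_ definition above) =====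
theorem tied_words_stats_spec : Claim_equal_tied_words_stats := by
  intro tied_words _ hpre
  unfold Spec_tied_words_stats
  match tied_words with
  | [] => exact absurd rfl hpre
  | w0 :: rest =>
    by_cases h10 : PySem.Str.len w0 = 10
    · have h10' : (↑w0.length : Int) = 10 := by simpa [PySem.Str.len_eq] using h10
      simp [tied_words_stats, tied_words_stats_alt, h10, h10', List.findIdx?_cons,
        min?_cons, max?_cons, minL, maxL]
    · have h10' : ¬ (↑w0.length : Int) = 10 := by simpa [PySem.Str.len_eq] using h10
      have hgo := go_eq rest w0 w0 le_rfl
      have hfeq : (fun w : String => PySem.Str.len w == 10)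
          = (fun w : String => ((w.length : Int) == 10)) := by
        funext w; simp [PySem.Str.len_eq]
      rw [hfeq] at hgo
      cases hfind : rest.findIdx? (fun w : String => ((w.length : Int) == 10)) with
      | none =>
        rw [hfind] at hgo
        simp [tied_words_stats, tied_words_stats_alt, h10', List.findIdx?_cons, hfind, hgo,
          min?_cons, max?_cons, minL, maxL]
      | some i =>
        rw [hfind] at hgo
        simp [tied_words_stats, tied_words_stats_alt, h10', List.findIdx?_cons, hfind, hgo,
          min?_cons, max?_cons, minL, maxL]
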